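-- pv_equiv track=rewrite | github.com/ghealysr/nicole-assistant | backend/app/services/npm_validator.py | _find_matching_version
-- ===== SOURCE A (Python) =====
-- from typing import Any, Dict, List, Optional, Set
--
-- def _find_matching_version(
--
--     requested: str,
--     available: List[str]
-- ) -> Optional[str]:
--     """Find a matching version from available versions."""
--     # Exact match
--     if requested in available:
--         return requested
--
--     # Try to find compatible version
--     for version in reversed(available):
--         if version.startswith(requested.split('.')[0]):
--             return version
--
--     # No match found
--     return None
-- ===== SOURCE B (Python) =====
-- from typing import List, Optional
--
-- def _find_matching_version(
--     requested: str,
--     available: List[str]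
-- ) -> Optional[str]:
--     """Single forward pass: track exact match and the last prefix-compatible version."""
--     major = requested.split('.')[0]
--     exact_found = False
--     candidate = None
--     for version in available:
--         if version == requested:
--             exact_found = True
--         if version.startswith(major):
--             candidate = version
--     return requested if exact_found else candidate
-- ===== Notes on version B (the rewrite author's own statement) =====
-- stated objective: faster
-- what changed: Replaces the membership test plus reversed prefix scan by a single forward pass that tracks an exact-match flag and overwrites the last prefix-matching candidate, computing the major prefix once instead of re-splitting requested on every iteration.
import Mathlib
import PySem

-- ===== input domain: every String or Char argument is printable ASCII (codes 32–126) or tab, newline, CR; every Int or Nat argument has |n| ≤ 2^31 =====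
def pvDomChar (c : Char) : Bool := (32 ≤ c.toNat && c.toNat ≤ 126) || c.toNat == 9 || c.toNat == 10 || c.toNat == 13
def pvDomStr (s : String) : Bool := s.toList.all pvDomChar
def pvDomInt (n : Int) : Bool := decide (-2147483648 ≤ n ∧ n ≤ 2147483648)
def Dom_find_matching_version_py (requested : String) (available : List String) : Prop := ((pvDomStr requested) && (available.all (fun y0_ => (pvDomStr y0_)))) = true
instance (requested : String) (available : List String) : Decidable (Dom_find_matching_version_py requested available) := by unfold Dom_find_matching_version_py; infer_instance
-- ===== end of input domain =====

-- B replaces A's membership test plus reversed prefix scan by one forward pass with an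
-- exact-match flag and a last-prefix-match candidate (objective: faster; a timing run measured B faster).

-- ===== PORT A =====
-- A's reversed loop: return the first version (in reversed order) starting with requested.split('.')[0].
-- split('.') always yields a nonempty list, so the [0] indexing never raises; getD 0 "" is exact here.
def pvALoop (requested : String) : List String → Option String
  | [] => none
  | v :: rest =>
    if PySem.Str.startswith v (((PySem.Str.split? requested ".").getD []).getD 0 "") then some v
    else pvALoop requested rest

def find_matching_version_py (requested : String) (available : List String) : Option String :=
  if available.contains requested then some requested
  else pvALoop requested available.reverse

-- ===== PORT B =====
def find_matching_version_py_alt (requested : String) (available : List String) : Option String :=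
  let major := ((PySem.Str.split? requested ".").getD []).getD 0 ""
  let st := available.foldl
    (fun (s : Bool × Option String) v =>
      (s.1 || (v == requested), if PySem.Str.startswith v major then some v else s.2))
    (false, none)
  if st.1 then some requested else st.2

-- ===== PRECONDITION & SPEC =====
def Spec_find_matching_version_py (requested : String) (available : List String) (out : Option String) : Prop := out = find_matching_version_py_alt requested available
instance (requested : String) (available : List String) (out : Option String) : Decidable (Spec_find_matching_version_py requested available out) := by unfold Spec_find_matching_version_py; infer_instance

-- ===== CLAIM (what is proved, stated in full; the proofs are below) =====
def Claim_equal_find_matching_version_py : Prop := ∀ (requested : String) (available : List String), Dom_find_matching_version_py requested available → Spec_find_matching_version_py requested available (find_matching_version_py requested available)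

-- ===== LEMMAS AND PROOFS =====

theorem pvALoop_append (requested : String) (xs ys : List String) :
    pvALoop requested (xs ++ ys) =
      match pvALoop requested xs with
      | some v => some v
      | none => pvALoop requested ys := by
  induction xs with
  | nil => simp [pvALoop]
  | cons v rest ih =>
    simp only [List.cons_append, pvALoop]
    split_ifs <;> simp [ih]

-- Characterisation of B's fold state over any starting accumulator.
theorem pvFold_char (requested : String) (l : List String) (b : Bool) (c : Option String) :
    l.foldl
      (fun (s : Bool × Option String) v =>
        (s.1 || (v == requested),
         if PySem.Str.startswith v (((PySem.Str.split? requested ".").getD []).getD 0 "") then some v else s.2))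
      (b, c) =
      (b || l.contains requested,
       match pvALoop requested l.reverse with
       | some v => some v
       | none => c) := by
  induction l generalizing b c with
  | nil => simp [pvALoop]
  | cons v rest ih =>
    simp only [List.foldl_cons, ih, List.reverse_cons, pvALoop_append, List.contains_cons,
      Prod.mk.injEq]
    refine ⟨?_, ?_⟩
    · simp [Bool.or_assoc, BEq.comm]
    · cases h : pvALoop requested rest.reverse <;> simp only [pvALoop] <;> split <;> simp

-- ===== VERDICT (by name: the statement is the Claim_ definition above) =====
theorem find_matching_version_py_spec : Claim_equal_find_matching_version_py := by
  intro requested available _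
  unfold Spec_find_matching_version_py find_matching_version_py find_matching_version_py_alt
  simp only [pvFold_char]
  simp only [Bool.false_or]
  split
  · rfl
  · cases pvALoop requested available.reverse <;> rfl
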